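-- pv_equiv track=rewrite | github.com/MartinGerard123/EulersNightmare | EulersNightmare.py | filtro_cuadrado_cubo
-- ===== SOURCE A (Python) =====
-- import math
--
-- def filtro_cuadrado_cubo(n):
--     raiz2 = math.isqrt(n)
--     if raiz2 * raiz2 == n: return raiz2
--     low, high = 1, raiz2
--     while low <= high:
--         mid = (low + high) // 2
--         cubo = mid * mid * mid
--         if cubo == n: return mid
--         elif cubo < n: low = mid + 1
--         else: high = mid - 1
--     return None
-- ===== SOURCE B (Python) =====
-- import math
--
-- def filtro_cuadrado_cubo(n):
--     s = math.isqrt(n)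
--     if s * s == n:
--         return s
--     # build the integer cube root bit by bit (digit recurrence), then verify
--     r = 0
--     shift = n.bit_length() // 3
--     while shift >= 0:
--         cand = r + (1 << shift)
--         if cand * cand * cand <= n:
--             r = cand
--         shift -= 1
--     return r if r * r * r == n else None
-- ===== Notes on version B (the rewrite author's own statement) =====
-- stated objective: alternative
-- what changed: replaces A's binary search over [1, isqrt(n)] for the cube root with a top-down bitwise digit-recurrence that constructs the integer cube root directly and then verifies it
import Mathlib
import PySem

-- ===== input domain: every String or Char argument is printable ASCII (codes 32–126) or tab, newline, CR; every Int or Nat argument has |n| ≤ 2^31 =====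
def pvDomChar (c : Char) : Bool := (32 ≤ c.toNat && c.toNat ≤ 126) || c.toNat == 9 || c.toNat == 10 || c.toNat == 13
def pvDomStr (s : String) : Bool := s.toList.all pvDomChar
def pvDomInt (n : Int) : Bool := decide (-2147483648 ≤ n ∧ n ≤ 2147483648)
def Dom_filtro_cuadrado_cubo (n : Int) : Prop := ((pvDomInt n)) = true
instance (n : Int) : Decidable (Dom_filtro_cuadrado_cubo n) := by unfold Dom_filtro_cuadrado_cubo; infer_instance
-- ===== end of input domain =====

-- B replaces A's binary search for the cube root with a top-down bitwise digit recurrence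
-- that constructs the integer cube root directly and verifies it (alternative algorithm, same cost class).

-- ===== PORT A =====
-- the while-loop of A: binary search for a cube root in [low, high]
def pvLoopA (n low high : Int) : Option Int :=
  if _h : low ≤ high then
    let mid := PySem.Int.floordiv (low + high) 2
    let cubo := mid * mid * mid
    if cubo = n then some mid
    else if cubo < n then pvLoopA n (mid + 1) high
    else pvLoopA n low (mid - 1)
  else none
termination_by (high - low + 1).toNat
decreasing_by
  · have h2 := PySem.Int.floordiv_two_mid_bounds _h
    omega
  · have h2 := PySem.Int.floordiv_two_mid_bounds _h
    omega

def filtro_cuadrado_cubo (n : Int) : Option Int :=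
  -- math.isqrt(n): exact for 0 ≤ n (Pre_); Python raises ValueError for n < 0
  let raiz2 : Int := (Nat.sqrt n.toNat : Int)
  if raiz2 * raiz2 = n then some raiz2
  else pvLoopA n 1 raiz2

-- ===== PORT B =====
-- the while-loop of B: digit recurrence, bits of the cube root from `shift` down to 0
def pvCbrtLoop (n r shift : Int) : Int :=
  if _h : 0 ≤ shift then
    let cand := r + ((1 : Int) <<< shift.toNat)
    pvCbrtLoop n (if cand * cand * cand ≤ n then cand else r) (shift - 1)
  else r
termination_by (shift + 1).toNat
decreasing_by omega

def filtro_cuadrado_cubo_alt (n : Int) : Option Int :=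
  -- math.isqrt(n): exact for 0 ≤ n (Pre_); Python raises ValueError for n < 0
  let s : Int := (Nat.sqrt n.toNat : Int)
  if s * s = n then some s
  else
    let r := pvCbrtLoop n 0 ((PySem.Int.bitLength n / 3 : Nat) : Int)
    if r * r * r = n then some r else none

-- ===== PRECONDITION & SPEC =====
-- math.isqrt raises ValueError on n < 0 (in both A and B), so negative inputs are excluded.
def Pre_filtro_cuadrado_cubo (n : Int) : Prop := 0 ≤ n
instance (n : Int) : Decidable (Pre_filtro_cuadrado_cubo n) := by unfold Pre_filtro_cuadrado_cubo; infer_instance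
def pvWitness_filtro_cuadrado_cubo : Int := 8

def Spec_filtro_cuadrado_cubo (n : Int) (out : Option Int) : Prop := out = filtro_cuadrado_cubo_alt n
instance (n : Int) (out : Option Int) : Decidable (Spec_filtro_cuadrado_cubo n out) := by unfold Spec_filtro_cuadrado_cubo; infer_instance

-- ===== CLAIM (what is proved, stated in full; the proofs are below) =====
def Claim_equal_filtro_cuadrado_cubo : Prop := ∀ (n : Int), Dom_filtro_cuadrado_cubo n → Pre_filtro_cuadrado_cubo n → Spec_filtro_cuadrado_cubo n (filtro_cuadrado_cubo n)

-- ===== LEMMAS AND PROOFS =====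

-- cube is monotone on nonnegatives
theorem pv_cube_le_cube {a b : Int} (ha : 0 ≤ a) (h : a ≤ b) : a * a * a ≤ b * b * b := by
  have hb : (0:Int) ≤ b := by omega
  nlinarith [mul_nonneg ha hb, mul_nonneg ha ha, mul_nonneg hb hb, sq_nonneg (a+b)]

-- the integer cube root bracket exists …
theorem pv_exists_ncbrt (m : Nat) : ∃ R : Nat, R * R * R ≤ m ∧ m < (R+1) * (R+1) * (R+1) := by
  induction m with
  | zero => exact ⟨0, by omega, by omega⟩
  | succ m ih =>
    obtain ⟨R, h1, h2⟩ := ih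
    by_cases h : m + 1 < (R+1) * (R+1) * (R+1)
    · exact ⟨R, by omega, h⟩
    · exact ⟨R + 1, by omega, by nlinarith⟩

theorem pv_exists_icbrt (n : Int) (hn : 0 ≤ n) :
    ∃ R : Int, 0 ≤ R ∧ R * R * R ≤ n ∧ n < (R+1) * (R+1) * (R+1) := by
  obtain ⟨R, h1, h2⟩ := pv_exists_ncbrt n.toNat
  refine ⟨(R : Int), by positivity, ?_, ?_⟩
  · have : ((R * R * R : Nat) : Int) ≤ ((n.toNat : Nat) : Int) := by exact_mod_cast h1
    push_cast at this; omega
  · have : ((n.toNat : Nat) : Int) < ((( R+1) * (R+1) * (R+1) : Nat) : Int) := by exact_mod_cast h2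
    push_cast at this; omega

-- … and is unique
theorem pv_icbrt_unique {n a b : Int} (ha0 : 0 ≤ a) (hb0 : 0 ≤ b)
    (ha1 : a * a * a ≤ n) (ha2 : n < (a+1) * (a+1) * (a+1))
    (hb1 : b * b * b ≤ n) (hb2 : n < (b+1) * (b+1) * (b+1)) : a = b := by
  by_contra hne
  rcases lt_or_gt_of_ne hne with h | h
  · have := pv_cube_le_cube (by omega : (0:Int) ≤ a + 1) (by omega : a + 1 ≤ b)
    omega
  · have := pv_cube_le_cube (by omega : (0:Int) ≤ b + 1) (by omega : b + 1 ≤ a)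
    omega

-- A's binary search finds the cube root when it is in range
theorem pv_loopA_found (n c : Int) (hc1 : 1 ≤ c) (hcube : c * c * c = n) :
    ∀ k : Nat, ∀ low high : Int, (high - low).toNat ≤ k → 1 ≤ low → low ≤ c → c ≤ high →
      pvLoopA n low high = some c := by
  intro k
  induction k using Nat.strong_induction_on with
  | _ k ih =>
    intro low high hk h1 hlc hch
    have hle : low ≤ high := le_trans hlc hch
    obtain ⟨hm1, hm2⟩ := PySem.Int.floordiv_two_mid_bounds hle
    rw [pvLoopA]
    simp only [dif_pos hle]
    set mid := PySem.Int.floordiv (low + high) 2 with hmid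
    by_cases he : mid * mid * mid = n
    · have hmc : mid = c := pv_icbrt_unique (by omega) (by omega)
        (le_of_eq he) (by nlinarith) (le_of_eq hcube) (by nlinarith)
      simp [hmc, hcube]
    · by_cases hlt : mid * mid * mid < n
      · have hmc : mid < c := by
          by_contra hcm
          have := pv_cube_le_cube (by omega : (0:Int) ≤ c) (by omega : c ≤ mid)
          omega
        have hkpos : 1 ≤ k := by omega
        simp only [if_neg he, if_pos hlt]
        exact ih (k - 1) (by omega) (mid + 1) high (by omega) (by omega) (by omega) hch
      · have hgt : n < mid * mid * mid := by omega
        have hmc : c < mid := by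
          by_contra hcm
          have := pv_cube_le_cube (by omega : (0:Int) ≤ mid) (by omega : mid ≤ c)
          omega
        have hkpos : 1 ≤ k := by omega
        simp only [if_neg he, if_neg hlt]
        exact ih (k - 1) (by omega) low (mid - 1) (by omega) h1 hlc (by omega)

-- A's binary search returns none when no cube root is in range
theorem pv_loopA_none (n : Int) :
    ∀ k : Nat, ∀ low high : Int, (high - low).toNat ≤ k → 1 ≤ low →
      (∀ c : Int, low ≤ c → c ≤ high → c * c * c ≠ n) →
      pvLoopA n low high = none := by
  intro k
  induction k using Nat.strong_induction_on with
  | _ k ih =>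
    intro low high hk h1 hno
    rw [pvLoopA]
    by_cases hle : low ≤ high
    · obtain ⟨hm1, hm2⟩ := PySem.Int.floordiv_two_mid_bounds hle
      simp only [dif_pos hle]
      set mid := PySem.Int.floordiv (low + high) 2 with hmid
      have he : mid * mid * mid ≠ n := hno mid hm1 hm2
      by_cases hlt : mid * mid * mid < n
      · simp only [if_neg he, if_pos hlt]
        by_cases hk0 : k = 0
        · have hml : mid = low := by omega
          have hmh : mid = high := by omega
          rw [pvLoopA]
          simp only [dif_neg (by omega : ¬ mid + 1 ≤ high)]
        · exact ih (k - 1) (by omega) (mid + 1) high (by omega) (by omega)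
            (fun c hc1 hc2 => hno c (by omega) hc2)
      · simp only [if_neg he, if_neg hlt]
        by_cases hk0 : k = 0
        · have hml : mid = low := by omega
          have hmh : mid = high := by omega
          rw [pvLoopA]
          simp only [dif_neg (by omega : ¬ low ≤ mid - 1)]
        · exact ih (k - 1) (by omega) low (mid - 1) (by omega) h1
            (fun c hc1 hc2 => hno c hc1 (by omega))
    · simp only [dif_neg hle]

-- B's digit recurrence computes the integer cube root
theorem pv_cbrtLoop_eq (n R : Int) (hR0 : 0 ≤ R) (hR1 : R * R * R ≤ n) (hR2 : n < (R+1) * (R+1) * (R+1)) :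
    ∀ k : Nat, ∀ shift r : Int, (shift + 1).toNat ≤ k → 0 ≤ r →
      (∃ q, r = 2 ^ (shift + 1).toNat * q) → r ≤ R → R < r + 2 ^ (shift + 1).toNat →
      pvCbrtLoop n r shift = R := by
  intro k
  induction k using Nat.strong_induction_on with
  | _ k ih =>
    intro shift r hk hr0 hdvd hrR hRr
    obtain ⟨q, hq⟩ := hdvd
    rw [pvCbrtLoop]
    by_cases hs : 0 ≤ shift
    · simp only [dif_pos hs]
      have hpow : ((1:Int) <<< shift.toNat) = 2 ^ shift.toNat := by simp [Int.shiftLeft_eq]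
      have hst : (shift + 1).toNat = shift.toNat + 1 := by omega
      have hst2 : ((shift - 1) + 1).toNat = shift.toNat := by omega
      have hppos : (0:Int) < 2 ^ shift.toNat := by positivity
      have hsplit : (2:Int) ^ (shift.toNat + 1) = 2 ^ shift.toNat + 2 ^ shift.toNat := by
        rw [pow_succ]; ring
      set cand := r + (1:Int) <<< shift.toNat with hcand
      have hcand' : cand = r + 2 ^ shift.toNat := by rw [hcand, hpow]
      have hcand2 : cand = 2 ^ shift.toNat * (2 * q + 1) := by
        rw [hcand', hq, hst, pow_succ]; ring
      have hq' : r = 2 ^ shift.toNat * (2 * q) := by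
        rw [hq, hst, pow_succ]; ring
      rw [hst] at hRr
      have hkpos : 1 ≤ k := by omega
      by_cases hc : cand * cand * cand ≤ n
      · have hcR : cand ≤ R := by
          by_contra hcon
          have h1 : R + 1 ≤ cand := by omega
          have := pv_cube_le_cube (by omega : (0:Int) ≤ R + 1) h1
          omega
        simp only [if_pos hc]
        exact ih (k - 1) (by omega) (shift - 1) cand (by omega)
          (by linarith) ⟨2 * q + 1, by rw [hst2]; exact hcand2⟩ hcR
          (by rw [hst2]; linarith)
      · have hnc : n < cand * cand * cand := by omega
        have hRc : R < cand := by
          by_contra hcon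
          have h1 : cand ≤ R := by omega
          have := pv_cube_le_cube (by linarith : (0:Int) ≤ cand) h1
          omega
        simp only [if_neg hc]
        exact ih (k - 1) (by omega) (shift - 1) r (by omega) hr0
          ⟨2 * q, by rw [hst2]; exact hq'⟩ hrR
          (by rw [hst2]; linarith)
    · simp only [dif_neg hs]
      have h0 : (shift + 1).toNat = 0 := by omega
      rw [h0, pow_zero] at hRr
      omega

-- ===== VERDICT (by name: the statement is the Claim_ definition above) =====
-- main equivalence
theorem filtro_cuadrado_cubo_spec : Claim_equal_filtro_cuadrado_cubo := by
  intro n _hdom hpre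
  have hn : 0 ≤ n := hpre
  show filtro_cuadrado_cubo n = filtro_cuadrado_cubo_alt n
  by_cases hsq : ((Nat.sqrt n.toNat : Int)) * (Nat.sqrt n.toNat : Int) = n
  · simp [filtro_cuadrado_cubo, filtro_cuadrado_cubo_alt, hsq]
  · obtain ⟨R, hR0, hR1, hR2⟩ := pv_exists_icbrt n hn
    -- R is small enough for B's starting shift
    have hbound : R < 2 ^ (PySem.Int.bitLength n / 3 + 1) := by
      set b := PySem.Int.bitLength n with hb
      set t := b / 3 with ht
      by_contra hcon
      have h1 : (2:Int) ^ (t + 1) ≤ R := by omega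
      have h2 := pv_cube_le_cube (by positivity : (0:Int) ≤ 2 ^ (t + 1)) h1
      have h3 : (2:Int) ^ (t+1) * 2 ^ (t+1) * 2 ^ (t+1) = 2 ^ (t+1+(t+1)+(t+1)) := by
        rw [← pow_add, ← pow_add]
      have h4 : t+1+(t+1)+(t+1) = 3*t+3 := by omega
      have h5 : b ≤ 3*t + 3 := by omega
      have h6 : (2:Int) ^ b ≤ 2 ^ (3*t+3) := pow_le_pow_right₀ (by norm_num) h5
      have h7 : n.natAbs < 2 ^ b := PySem.Int.lt_two_pow_bitLength n
      have h8 : n < 2 ^ b := by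
        calc n ≤ |n| := le_abs_self n
          _ = (n.natAbs : Int) := Int.abs_eq_natAbs n
          _ < ((2 ^ b : Nat) : Int) := by exact_mod_cast h7
          _ = 2 ^ b := by push_cast; ring
      rw [h3, h4] at h2
      nlinarith
    -- B's loop computes R
    have hbl : pvCbrtLoop n 0 ((PySem.Int.bitLength n / 3 : Nat) : Int) = R := by
      have hst : (((PySem.Int.bitLength n / 3 : Nat) : Int) + 1).toNat
          = PySem.Int.bitLength n / 3 + 1 := by omega
      apply pv_cbrtLoop_eq n R hR0 hR1 hR2
        ((((PySem.Int.bitLength n / 3 : Nat) : Int)) + 1).toNat _ _ le_rfl le_rfl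
        ⟨0, by ring⟩ hR0
      rw [hst]
      simpa using hbound
    by_cases hcube : R * R * R = n
    · -- a cube: both return some R
      have hRpos : 1 ≤ R := by
        rcases (by omega : R = 0 ∨ 1 ≤ R) with h0 | h
        · exfalso
          apply hsq
          have hn0 : n = 0 := by rw [h0] at hcube; omega
          simp [hn0]
        · exact h
      have hRsq : R ≤ (Nat.sqrt n.toNat : Int) := by
        have htR : ((R.toNat : Nat) : Int) = R := Int.toNat_of_nonneg hR0
        have hRR : R * R ≤ n := by nlinarith
        have hcastn : ((n.toNat : Nat) : Int) = n := Int.toNat_of_nonneg hn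
        have h1 : R.toNat * R.toNat ≤ n.toNat := by
          have : ((R.toNat * R.toNat : Nat) : Int) ≤ ((n.toNat : Nat) : Int) := by
            push_cast
            rw [htR]
            omega
          exact_mod_cast this
        have h2 : R.toNat ≤ Nat.sqrt n.toNat := Nat.le_sqrt.mpr (by
          simpa [Nat.pow_two] using h1)
        calc R = ((R.toNat : Nat) : Int) := htR.symm
          _ ≤ _ := by exact_mod_cast h2
      have ha : pvLoopA n 1 ((Nat.sqrt n.toNat : Int)) = some R :=
        pv_loopA_found n R hRpos hcube (((Nat.sqrt n.toNat : Int)) - 1).toNat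
          1 _ le_rfl le_rfl hRpos hRsq
      simp only [filtro_cuadrado_cubo, filtro_cuadrado_cubo_alt, if_neg hsq]
      rw [hbl, ha, if_pos hcube]
    · -- not a cube: both return none
      have ha : pvLoopA n 1 ((Nat.sqrt n.toNat : Int)) = none := by
        apply pv_loopA_none n (((Nat.sqrt n.toNat : Int)) - 1).toNat 1 _ le_rfl le_rfl
        intro c hc1 hc2 hceq
        have hcb : c * c * c ≤ n := le_of_eq hceq
        have hcb2 : n < (c+1) * (c+1) * (c+1) := by nlinarith
        exact hcube (pv_icbrt_unique hR0 (by omega) hR1 hR2 hcb hcb2 ▸ hceq)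
      simp only [filtro_cuadrado_cubo, filtro_cuadrado_cubo_alt, if_neg hsq]
      rw [hbl, ha, if_neg hcube]
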